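-- pv_equiv track=rewrite | github.com/bstriner/graph-lm | graph_lm/models/networks/utils/bintree_utils.py | tree_index_map
-- ===== SOURCE A (Python) =====
-- def tree_index_map(idx):
--     depth = len(idx)
--     output_idx = 0
--     mult = 1
--     for i in reversed(idx):
--         output_idx += mult * i
--         mult *= 2
--     return depth, output_idx
-- ===== SOURCE B (Python) =====
-- def tree_index_map(idx):
--     output_idx = 0
--     for i in idx:
--         output_idx = output_idx * 2 + i
--     return len(idx), output_idx
-- ===== Notes on version B (the rewrite author's own statement) =====
-- stated objective: idiomatic
-- what changed: Replaces the reversed traversal with an explicit power-of-two multiplier by a forward Horner accumulation (acc = acc*2 + i), dropping the mult variable.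
import Mathlib
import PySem

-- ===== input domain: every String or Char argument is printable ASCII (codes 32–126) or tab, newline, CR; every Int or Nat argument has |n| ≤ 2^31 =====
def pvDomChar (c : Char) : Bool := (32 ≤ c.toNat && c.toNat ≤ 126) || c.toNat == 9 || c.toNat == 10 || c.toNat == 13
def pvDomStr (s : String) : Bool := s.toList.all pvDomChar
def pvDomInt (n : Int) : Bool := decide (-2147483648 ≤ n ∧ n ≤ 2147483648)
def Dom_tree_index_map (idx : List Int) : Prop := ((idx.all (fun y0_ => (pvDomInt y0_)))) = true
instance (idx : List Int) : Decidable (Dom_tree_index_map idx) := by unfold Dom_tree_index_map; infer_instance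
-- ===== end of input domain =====

-- B replaces A's reversed traversal with a power-of-two multiplier by a forward
-- Horner accumulation (acc = acc*2 + i); same value on every list (idiomatic objective).

-- ===== PORT A =====
-- loop 'for i in reversed(idx)' carrying (output_idx, mult)
def tree_index_map (idx : List Int) : Int × Int :=
  let depth : Int := idx.length
  let s := idx.reverse.foldl (fun (s : Int × Int) i => (s.1 + s.2 * i, s.2 * 2)) (0, 1)
  (depth, s.1)

-- ===== PORT B =====
-- forward loop 'output_idx = output_idx * 2 + i'
def tree_index_map_alt (idx : List Int) : Int × Int :=
  (idx.length, idx.foldl (fun acc i => acc * 2 + i) 0)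

-- ===== PRECONDITION & SPEC =====
def Spec_tree_index_map (idx : List Int) (out : Int × Int) : Prop := out = tree_index_map_alt idx
instance (idx : List Int) (out : Int × Int) : Decidable (Spec_tree_index_map idx out) := by unfold Spec_tree_index_map; infer_instance

-- ===== CLAIM (what is proved, stated in full; the proofs are below) =====
def Claim_equal_tree_index_map : Prop := ∀ (idx : List Int), Dom_tree_index_map idx → Spec_tree_index_map idx (tree_index_map idx)

-- ===== LEMMAS AND PROOFS =====

-- Horner fold with a nonzero seed shifts the seed by 2^length.
theorem horner_foldl_seed (l : List Int) (a : Int) :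
    l.foldl (fun acc i => acc * 2 + i) a
      = a * 2 ^ l.length + l.foldl (fun acc i => acc * 2 + i) 0 := by
  induction l generalizing a with
  | nil => simp
  | cons x t ih =>
    simp only [List.foldl_cons, List.length_cons]
    rw [ih (a * 2 + x), ih (0 * 2 + x)]
    ring

-- A's reverse fold computes (seed + mult * Horner value, mult * 2^length).
theorem rev_fold_eq (l : List Int) (a m : Int) :
    l.reverse.foldl (fun (s : Int × Int) i => (s.1 + s.2 * i, s.2 * 2)) (a, m)
      = (a + m * l.foldl (fun acc i => acc * 2 + i) 0, m * 2 ^ l.length) := by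
  induction l generalizing a m with
  | nil => simp
  | cons x t ih =>
    simp only [List.reverse_cons, List.foldl_append, List.foldl_cons, List.foldl_nil,
      List.length_cons, ih]
    rw [horner_foldl_seed t (0 * 2 + x)]
    exact Prod.ext (by ring) (by ring)

-- ===== VERDICT (by name: the statement is the Claim_ definition above) =====
theorem tree_index_map_spec : Claim_equal_tree_index_map := by
  intro idx _
  unfold Spec_tree_index_map tree_index_map tree_index_map_alt
  rw [rev_fold_eq]
  simp
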